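-- pv_equiv track=rewrite | github.com/vivearth/ai-book-designer | server/app/skills/fiction_book_page_skill.py | _expand_mock
-- ===== SOURCE A (Python) =====
-- def _expand_mock(seed: str, target_words: int, direction: str, rough_text: str) -> str:
--     paragraphs = [
--         seed.strip(),
--         (
--             f"{direction} keeps tightening as the street noise rises and every decision has to be made in motion. "
--             f"{rough_text} The scene stays close to the body: breath, impact, split-second choices, and the fear of losing one step."
--         ),
--         "Traffic blurs into horns, shouting, and braking metal while the protagonist pushes through gaps that were never meant for escape.",
--         "By the end of the beat, the danger is still active, but the character has earned one fragile breath before the next turn.",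
--     ]
--     result = "\n\n".join([p for p in paragraphs if p])
--     words = result.split()
--     while len(words) < max(120, int(target_words * 0.7)):
--         words.extend((paragraphs[1] + " " + paragraphs[2]).split())
--     return " ".join(words[: max(140, int(target_words * 0.95))])
-- ===== SOURCE B (Python) =====
-- def _expand_mock(seed: str, target_words: int, direction: str, rough_text: str) -> str:
--     paragraphs = [
--         seed.strip(),
--         (
--             f"{direction} keeps tightening as the street noise rises and every decision has to be made in motion. "
--             f"{rough_text} The scene stays close to the body: breath, impact, split-second choices, and the fear of losing one step."
--         ),
--         "Traffic blurs into horns, shouting, and braking metal while the protagonist pushes through gaps that were never meant for escape.",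
--         "By the end of the beat, the danger is still active, but the character has earned one fragile breath before the next turn.",
--     ]
--     result = "\n\n".join([p for p in paragraphs if p])
--     words = result.split()
--     threshold = max(120, int(target_words * 0.7))
--     deficit = threshold - len(words)
--     if deficit > 0:
--         chunk = (paragraphs[1] + " " + paragraphs[2]).split()
--         words = words + chunk * (-(-deficit // len(chunk)))
--     return " ".join(words[: max(140, int(target_words * 0.95))])
-- ===== Notes on version B (the rewrite author's own statement) =====
-- stated objective: simpler
-- what changed: The grow-until-threshold while loop is replaced by a closed-form ceiling division that computes the exact number of chunk repetitions and appends them with one list multiplication.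
import Mathlib
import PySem

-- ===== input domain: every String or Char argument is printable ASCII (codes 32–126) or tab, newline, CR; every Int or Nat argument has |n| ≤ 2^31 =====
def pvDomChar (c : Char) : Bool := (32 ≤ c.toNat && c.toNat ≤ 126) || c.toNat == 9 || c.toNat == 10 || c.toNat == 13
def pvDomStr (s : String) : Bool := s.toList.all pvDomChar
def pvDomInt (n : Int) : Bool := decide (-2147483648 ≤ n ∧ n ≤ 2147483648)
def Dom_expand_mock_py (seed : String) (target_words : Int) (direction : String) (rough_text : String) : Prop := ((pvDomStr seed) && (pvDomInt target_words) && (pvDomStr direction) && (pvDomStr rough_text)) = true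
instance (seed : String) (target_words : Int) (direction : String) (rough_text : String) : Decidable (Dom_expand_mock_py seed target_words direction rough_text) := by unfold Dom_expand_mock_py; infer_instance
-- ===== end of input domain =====

-- B replaces A's grow-until-threshold while loop by a closed-form ceiling division and one
-- list multiplication (objective: simpler).

-- ===== PORT A =====

-- Exact model of CPython's int(n * c) where c is the IEEE-754 double with value m / 2^52
-- (round-to-nearest-even product, truncation toward zero); exact for |n| ≤ 2^31 — the
-- constants used below are 0.7 = 3152519739159347/2^52 and 0.95 = 4278419646001971/2^52.
-- Used by both ports, since both Pythons write int(target_words * 0.7) / int(target_words * 0.95).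
def pyFloatMulTrunc (n : Int) (m : Nat) : Int :=
  let a : Nat := n.natAbs * m
  let v : Nat :=
    if a = 0 then 0
    else
      let k := Nat.log2 a
      if k ≤ 52 then a / 2 ^ 52          -- a < 2^53: the product is an exact double
      else
        let sh := k - 52
        let q := a / 2 ^ sh
        let r := a % 2 ^ sh
        let half := 2 ^ (sh - 1)
        let q2 := if half < r then q + 1 else if r < half then q else q + q % 2
        (q2 * 2 ^ sh) / 2 ^ 52
  if 0 ≤ n then (v : Int) else -(v : Int)

-- A's while loop: words.extend(chunk) while len(words) < threshold.  The extra 'chunk ≠ []'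
-- conjunct only makes the recursion total (Python would not terminate there); in both ports
-- chunk is a split containing a fixed non-empty sentence, so the guard never differs.
def expandLoop (threshold : Int) (chunk : List String) (words : List String) : List String :=
  if h : (words.length : Int) < threshold ∧ chunk ≠ [] then
    expandLoop threshold chunk (words ++ chunk)
  else words
termination_by (threshold - words.length).toNat
decreasing_by
  have hl : 0 < chunk.length := List.length_pos_of_ne_nil h.2
  have := h.1
  simp only [List.length_append]
  omega

def expand_mock_py (seed : String) (target_words : Int) (direction : String) (rough_text : String) : String :=
  let p0 := PySem.Str.strip seed
  let p1 := direction ++ " keeps tightening as the street noise rises and every decision has to be made in motion. " ++ rough_text ++ " The scene stays close to the body: breath, impact, split-second choices, and the fear of losing one step."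
  let p2 := "Traffic blurs into horns, shouting, and braking metal while the protagonist pushes through gaps that were never meant for escape."
  let p3 := "By the end of the beat, the danger is still active, but the character has earned one fragile breath before the next turn."
  let paragraphs := [p0, p1, p2, p3]
  let result := PySem.Str.join "\n\n" (paragraphs.filter (fun p => p ≠ ""))
  let words := PySem.Str.split₀ result
  let chunk := PySem.Str.split₀ (p1 ++ " " ++ p2)
  let words := expandLoop (max 120 (pyFloatMulTrunc target_words 3152519739159347)) chunk words
  PySem.Str.join " " (PySem.List.slice words none (some (max 140 (pyFloatMulTrunc target_words 4278419646001971))))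

-- ===== PORT B =====
def expand_mock_py_alt (seed : String) (target_words : Int) (direction : String) (rough_text : String) : String :=
  let p0 := PySem.Str.strip seed
  let p1 := direction ++ " keeps tightening as the street noise rises and every decision has to be made in motion. " ++ rough_text ++ " The scene stays close to the body: breath, impact, split-second choices, and the fear of losing one step."
  let p2 := "Traffic blurs into horns, shouting, and braking metal while the protagonist pushes through gaps that were never meant for escape."
  let p3 := "By the end of the beat, the danger is still active, but the character has earned one fragile breath before the next turn."
  let paragraphs := [p0, p1, p2, p3]
  let result := PySem.Str.join "\n\n" (paragraphs.filter (fun p => p ≠ ""))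
  let words := PySem.Str.split₀ result
  let threshold := max 120 (pyFloatMulTrunc target_words 3152519739159347)
  let words :=
    if 0 < threshold - (words.length : Int) then
      let chunk := PySem.Str.split₀ (p1 ++ " " ++ p2)
      words ++ PySem.List.pyRepeat chunk (-(PySem.Int.floordiv (-(threshold - (words.length : Int))) (chunk.length : Int)))
    else words
  PySem.Str.join " " (PySem.List.slice words none (some (max 140 (pyFloatMulTrunc target_words 4278419646001971))))

-- ===== PRECONDITION & SPEC =====
def Spec_expand_mock_py (seed : String) (target_words : Int) (direction : String) (rough_text : String) (out : String) : Prop := out = expand_mock_py_alt seed target_words direction rough_text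
instance (seed : String) (target_words : Int) (direction : String) (rough_text : String) (out : String) : Decidable (Spec_expand_mock_py seed target_words direction rough_text out) := by unfold Spec_expand_mock_py; infer_instance

-- ===== CLAIM (what is proved, stated in full; the proofs are below) =====
def Claim_equal_expand_mock_py : Prop := ∀ (seed : String) (target_words : Int) (direction : String) (rough_text : String), Dom_expand_mock_py seed target_words direction rough_text → Spec_expand_mock_py seed target_words direction rough_text (expand_mock_py seed target_words direction rough_text)

-- ===== LEMMAS AND PROOFS =====

lemma pyRepeat_nil (n : Int) : PySem.List.pyRepeat ([] : List String) n = [] := by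
  simp [PySem.List.pyRepeat]

lemma pyRepeat_succ (chunk : List String) (q : Int) (hq : 0 ≤ q) :
    PySem.List.pyRepeat chunk (q + 1) = chunk ++ PySem.List.pyRepeat chunk q := by
  have h1 : (q + 1).toNat = q.toNat + 1 := by omega
  simp [PySem.List.pyRepeat, h1, List.replicate_succ]

lemma pyRepeat_one (chunk : List String) : PySem.List.pyRepeat chunk 1 = chunk := by
  simp [PySem.List.pyRepeat]

-- ceil(a/L) = ceil((a-L)/L) + 1 for a - L > 0
lemma ceil_step (a L : Int) (hL : 0 < L) (_h2 : 0 < a - L) :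
    -(PySem.Int.floordiv (-a) L) = -(PySem.Int.floordiv (-(a - L)) L) + 1 := by
  have hb := (PySem.Int.neg_floordiv_neg_eq_iff_of_pos (a := a - L)
    (q := -(PySem.Int.floordiv (-(a - L)) L)) hL).mp rfl
  refine (PySem.Int.neg_floordiv_neg_eq_iff_of_pos hL).mpr ⟨?_, ?_⟩ <;> nlinarith [hb.1, hb.2]

lemma ceil_pos (a L : Int) (hL : 0 < L) (ha : 0 < a) : 0 < -(PySem.Int.floordiv (-a) L) := by
  have hb := (PySem.Int.neg_floordiv_neg_eq_iff_of_pos (a := a)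
    (q := -(PySem.Int.floordiv (-a) L)) hL).mp rfl
  nlinarith [hb.1, hb.2]

lemma ceil_one (a L : Int) (hL : 0 < L) (h1 : 0 < a) (h2 : a - L ≤ 0) :
    -(PySem.Int.floordiv (-a) L) = 1 := by
  refine (PySem.Int.neg_floordiv_neg_eq_iff_of_pos hL).mpr ⟨by linarith, by linarith⟩

lemma expandLoop_closed (t : Int) (chunk : List String) (words : List String) :
    expandLoop t chunk words =
      if 0 < t - (words.length : Int) then
        words ++ PySem.List.pyRepeat chunk (-(PySem.Int.floordiv (-(t - (words.length : Int))) (chunk.length : Int)))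
      else words := by
  by_cases hc : chunk = []
  · subst hc
    rw [expandLoop]
    simp only [ne_eq, not_true_eq_false, and_false, dite_false, pyRepeat_nil, List.append_nil]
    split_ifs <;> rfl
  · have hL : 0 < (chunk.length : Int) := by
      exact_mod_cast List.length_pos_of_ne_nil hc
    suffices H : ∀ (d : Nat) (ws : List String), (t - (ws.length : Int)).toNat ≤ d →
        expandLoop t chunk ws =
          if 0 < t - (ws.length : Int) then
            ws ++ PySem.List.pyRepeat chunk (-(PySem.Int.floordiv (-(t - (ws.length : Int))) (chunk.length : Int)))
          else ws from H _ words le_rfl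
    intro d
    induction d with
    | zero =>
      intro ws h
      rw [expandLoop, dif_neg (by rintro ⟨h2, -⟩; omega), if_neg (by omega)]
    | succ d ih =>
      intro ws h
      by_cases hlt : (ws.length : Int) < t
      · have hside : (t - ((ws ++ chunk).length : Int)).toNat ≤ d := by
          simp only [List.length_append, Nat.cast_add]
          omega
        rw [expandLoop, dif_pos ⟨hlt, hc⟩, ih (ws ++ chunk) hside]
        simp only [List.length_append, Nat.cast_add]
        split_ifs with h2 h3
        · have hstep := ceil_step (t - (ws.length : Int)) (chunk.length : Int) hL (by omega)
          have heq : t - ((ws.length : Int) + (chunk.length : Int)) = t - (ws.length : Int) - (chunk.length : Int) := by ring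
          rw [heq] at h2
          rw [heq, hstep, pyRepeat_succ _ _ (le_of_lt (ceil_pos _ _ hL h2)), List.append_assoc]
        · exact absurd (by omega) h3
        · have heq : t - ((ws.length : Int) + (chunk.length : Int)) = t - (ws.length : Int) - (chunk.length : Int) := by ring
          rw [heq] at h2
          rw [ceil_one (t - (ws.length : Int)) (chunk.length : Int) hL (by omega) (by omega),
            pyRepeat_one]
        · exact absurd (by omega) h2
      · rw [expandLoop, dif_neg (by rintro ⟨h2, -⟩; exact hlt h2), if_neg (by omega)]

-- ===== VERDICT (by name: the statement is the Claim_ definition above) =====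
theorem expand_mock_py_spec : Claim_equal_expand_mock_py := by
  intro seed target_words direction rough_text _
  unfold Spec_expand_mock_py expand_mock_py expand_mock_py_alt
  simp only [expandLoop_closed]
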